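-- pv_equiv track=rewrite | github.com/mehmetcangurbuz08/Image-Processing-Project | src/Main.py | sort_rows_border
-- ===== SOURCE A (Python) =====
-- def sort_rows_border(img_matrix):
--
--     height = len(img_matrix)
--     width = len(img_matrix[0])
--     for i in range(height):
--         for a in range(width):
--             img_matrix[i][a]  = int(img_matrix[i][a])
--     for i in range(height):
--         start = 0
--         end = 0
--         partlist = []
--         for el in range(width):
--             if el != width-1 and img_matrix[i][el] != 0 :
--                 end += 1
--             elif img_matrix[i][el] == 0 and img_matrix[i][el-1] != 0 :
--                 sortedlist = sorted(img_matrix[i][start:end])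
--                 for b in sortedlist:
--                     partlist.append(b)
--
--
--                 partlist.append(img_matrix[i][el])
--                 end += 1
--                 start = end
--
--
--             elif img_matrix[i][el] == 0 and img_matrix[i][el-1] == 0:
--                 partlist.append(img_matrix[i][el])
--                 end += 1
--                 start = end
--             elif el == width-1 and img_matrix[i][el] != 0 :
--                 end += 1
--                 lastsorted = sorted(img_matrix[i][start:end])
--                 lastsorted.sort()
--                 for b in lastsorted:
--                     partlist.append(b)
--         img_matrix[i] = partlist
--     for i in range(height):
--         for a in range(width):
--             img_matrix[i][a]  = str(img_matrix[i][a])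
--
--
--     return img_matrix
-- ===== SOURCE B (Python) =====
-- def sort_rows_border(img_matrix):
--     # Different algorithm: instead of scanning for run boundaries and sorting each
--     # segment separately, label every non-zero entry with its group id (= number of
--     # zeros to its left), do ONE global sort of the (group, value) pairs per row
--     # (lexicographic tuple order keeps groups apart and orders values within a group),
--     # and merge the sorted values back over the zero positions.
--     # Like A, reassigns each row of img_matrix to a fresh list and returns img_matrix.
--     width = len(img_matrix[0])
--     for i, row in enumerate(img_matrix):
--         vals = [int(x) for x in row[:width]]
--         zeros_before = 0
--         keyed = []
--         for v in vals:
--             if v == 0: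
--                 zeros_before += 1
--             else:
--                 keyed.append((zeros_before, v))
--         keyed.sort()
--         it = iter(keyed)
--         img_matrix[i] = ['0' if v == 0 else str(next(it)[1]) for v in vals]
--     return img_matrix
-- ===== Notes on version B (the rewrite author's own statement) =====
-- stated objective: alternative
-- what changed: Instead of A's three passes with a start/end boundary scan that detects and sorts each zero-delimited segment separately, B labels each non-zero entry with its group id (number of zeros to its left), performs one global lexicographic sort of the (group, value) pairs per row, and merges the sorted values back over the zero positions.
import Mathlib
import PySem

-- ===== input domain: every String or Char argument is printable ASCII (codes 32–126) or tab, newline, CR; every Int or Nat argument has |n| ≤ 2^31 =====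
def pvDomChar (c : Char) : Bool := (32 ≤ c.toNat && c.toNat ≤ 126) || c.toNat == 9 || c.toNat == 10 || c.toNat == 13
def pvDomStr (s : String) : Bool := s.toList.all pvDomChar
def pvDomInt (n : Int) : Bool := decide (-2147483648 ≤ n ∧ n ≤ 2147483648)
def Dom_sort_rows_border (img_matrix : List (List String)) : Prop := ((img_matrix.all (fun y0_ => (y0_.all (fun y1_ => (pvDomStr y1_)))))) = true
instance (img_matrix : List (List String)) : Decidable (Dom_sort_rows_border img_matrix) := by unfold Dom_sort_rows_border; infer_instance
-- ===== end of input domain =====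

-- B replaces A's segment-boundary scan by one global (group id, value) sort per row, merged back
-- over the zeros; A mutates img_matrix in place (B performs the same row reassignment in Python);
-- the equivalence proved here is about the RETURN value.

-- ===== PORT A =====
-- int() conversion pass over range(width): Pre_ guarantees every int() succeeds, so getD 0 never fires
def pvAConv (width : Nat) (row : List String) : List Int :=
  (row.take width).map (fun s => (PySem.Int.ofStr? s).getD 0)

-- img_matrix[i][el-1] != 0:  for el = 0 Python reads index -1, the LAST element of the row; if the
-- row is longer than width that element is a still-unconverted string, and `str != int` is True — exact.
def pvAPrevNZ (width : Nat) (row : List String) (vals : List Int) (el : Nat) : Bool :=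
  if el = 0 then
    if width < row.length then true
    else decide (vals.getLast?.getD 0 ≠ 0)
  else decide (vals.getD (el - 1) 0 ≠ 0)

-- one iteration of A's `for el in range(width)` over state (start, end, partlist)
def pvAStep (width : Nat) (row : List String) (vals : List Int)
    (st : Nat × Nat × List Int) (el : Nat) : Nat × Nat × List Int :=
  let start := st.1
  let end_ := st.2.1
  let part := st.2.2
  let v := vals.getD el 0   -- img_matrix[i][el]: el < width ≤ row length under Pre_, so in range
  if el ≠ width - 1 ∧ v ≠ 0 then
    (start, end_ + 1, part)
  else if v = 0 ∧ pvAPrevNZ width row vals el = true then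
    let sortedlist := PySem.List.sorted
      (PySem.List.slice vals (some (start : Int)) (some (end_ : Int))) (fun x => x) false
    (end_ + 1, end_ + 1, part ++ sortedlist ++ [v])
  else if v = 0 ∧ pvAPrevNZ width row vals el = false then
    (end_ + 1, end_ + 1, part ++ [v])
  else if el = width - 1 ∧ v ≠ 0 then
    let lastsorted := PySem.List.sorted (PySem.List.sorted
      (PySem.List.slice vals (some (start : Int)) (some ((end_ + 1 : Nat) : Int))) (fun x => x) false)
      (fun x => x) false   -- sorted(...) followed by .sort(): a double sort, kept literally
    (start, end_ + 1, part ++ lastsorted)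
  else st   -- unreachable: the four branches are exhaustive

def pvARow (width : Nat) (row : List String) : List Int :=
  let vals := pvAConv width row
  ((List.range width).foldl (pvAStep width row vals) (0, 0, [])).2.2

def sort_rows_border (img_matrix : List (List String)) : List (List String) :=
  let width := (img_matrix.headD []).length  -- len(img_matrix[0]); Pre_ excludes [] where Python raises IndexError
  -- final str() pass over range(width): partlist always has exactly width entries, so it is a full map — exact
  img_matrix.map (fun row => (pvARow width row).map PySem.Int.toStr)

-- ===== PORT B =====
-- the `for v in vals` loop building (zeros_before, v) pairs for the non-zero entries
def pvKeyedStep (st : Int × List (Int × Int)) (v : Int) : Int × List (Int × Int) :=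
  if v = 0 then (st.1 + 1, st.2) else (st.1, st.2 ++ [(st.1, v)])

def pvKeyed (vals : List Int) : List (Int × Int) :=
  (vals.foldl pvKeyedStep (0, [])).2

-- the final comprehension: zeros emit '0', non-zeros consume next(it)[1] from the sorted pairs;
-- under Pre_ the iterator never exhausts (one pair per non-zero entry), so the headD default is never read
def pvRefill : List Int → List (Int × Int) → List String
  | [], _ => []
  | v :: rest, q =>
    if v = 0 then "0" :: pvRefill rest q
    else PySem.Int.toStr (q.headD (0, 0)).2 :: pvRefill rest q.tail

def sort_rows_border_alt (img_matrix : List (List String)) : List (List String) :=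
  let width := (img_matrix.headD []).length
  img_matrix.map (fun row =>
    let vals := (row.take width).map (fun s => (PySem.Int.ofStr? s).getD 0)
    -- keyed.sort(): Python compares 2-tuples of ints lexicographically = the toLex order on Int ×ₗ Int
    pvRefill vals (PySem.List.sorted (pvKeyed vals) (fun p => toLex p) false))

-- ===== PRECONDITION & SPEC =====
-- Pre_ excludes exactly the inputs where A raises: the empty matrix (IndexError on img_matrix[0]),
-- rows shorter than len(img_matrix[0]) (IndexError), and entries whose first-width strings are not
-- valid int() literals (ValueError). A returns normally on everything Pre_ admits.
def Pre_sort_rows_border (img_matrix : List (List String)) : Prop :=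
  img_matrix ≠ [] ∧
  ∀ row ∈ img_matrix,
    (img_matrix.headD []).length ≤ row.length ∧
    ∀ s ∈ row.take (img_matrix.headD []).length, PySem.Int.ofStr? s ≠ none

instance (img_matrix : List (List String)) : Decidable (Pre_sort_rows_border img_matrix) := by
  unfold Pre_sort_rows_border; infer_instance

def pvWitness_sort_rows_border : List (List String) :=
  [[" 7 ", "0", "3", "2"], ["+1", "0", "-2", "0"]]

def Spec_sort_rows_border (img_matrix : List (List String)) (out : List (List String)) : Prop := out = sort_rows_border_alt img_matrix
instance (img_matrix : List (List String)) (out : List (List String)) : Decidable (Spec_sort_rows_border img_matrix out) := by unfold Spec_sort_rows_border; infer_instance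

-- ===== CLAIM (what is proved, stated in full; the proofs are below) =====
def Claim_equal_sort_rows_border : Prop := ∀ (img_matrix : List (List String)), Dom_sort_rows_border img_matrix → Pre_sort_rows_border img_matrix → Spec_sort_rows_border img_matrix (sort_rows_border img_matrix)

-- ===== LEMMAS AND PROOFS =====

-- proof-only middle form: the row with each zero-delimited non-zero segment sorted, as Ints
def bRunI : List Int → List Int
  | [] => []
  | v :: rest =>
    if v = 0 then 0 :: bRunI rest
    else
      PySem.List.sorted ((v :: rest).takeWhile (fun x => decide (x ≠ 0))) (fun x => x) false
        ++ bRunI ((v :: rest).dropWhile (fun x => decide (x ≠ 0)))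
termination_by l => l.length
decreasing_by
  · simp
  · rename_i hv
    simp only [List.dropWhile_cons, decide_eq_true_eq, List.length_cons]
    rw [if_pos hv]
    exact Nat.lt_succ_of_le (List.length_dropWhile_le _ _)

lemma toStr_zero : PySem.Int.toStr 0 = "0" := by decide

lemma getD_lt (vals : List Int) (i : Nat) (h : i < vals.length) : vals.getD i 0 = vals[i] := by
  simp [List.getD_eq_getElem?_getD, List.getElem?_eq_getElem h]

lemma dropWhile_ends_zero (l : List Int) :
    ∃ q, (l ++ [0]).dropWhile (fun x => decide (x ≠ 0)) = q ++ [(0:Int)] := by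
  induction l with
  | nil => exact ⟨[], by simp⟩
  | cons x xs ih =>
    by_cases hx : x = 0
    · refine ⟨x :: xs, ?_⟩
      rw [List.cons_append, List.dropWhile_cons, if_neg (by simp [hx])]
    · obtain ⟨q, hq⟩ := ih
      refine ⟨q, ?_⟩
      rw [List.cons_append, List.dropWhile_cons, if_pos (by simp [hx])]
      exact hq

lemma bRunI_append_aux : ∀ (n : Nat) (p rest : List Int), p.length ≤ n →
    (p = [] ∨ ∃ q, p = q ++ [(0:Int)]) →
    bRunI (p ++ rest) = bRunI p ++ bRunI rest := by
  intro n
  induction n with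
  | zero =>
    intro p rest hl _
    cases p with
    | nil => simp [bRunI]
    | cons v p' => simp at hl
  | succ n ih =>
    intro p rest hl h
    cases p with
    | nil => simp [bRunI]
    | cons v p' =>
      rcases h with h | ⟨q, hq⟩
      · simp at h
      cases q with
      | nil =>
        simp only [List.nil_append] at hq
        have hv : v = 0 ∧ p' = [] := by simpa using hq
        obtain ⟨rfl, rfl⟩ := hv
        simp [bRunI]
      | cons w q' =>
        have hw : v = w ∧ p' = q' ++ [(0:Int)] := by simpa using hq
        obtain ⟨rfl, hp'⟩ := hw
        by_cases hv : v = 0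
        · subst hv
          have hr : p'.length ≤ n := by simp at hl; omega
          have hrec := ih p' rest hr (Or.inr ⟨q', hp'⟩)
          simp [bRunI, hrec]
        · subst hp'
          have hmem : (0:Int) ∈ v :: (q' ++ [(0:Int)]) := by simp
          have htw : ¬((List.takeWhile (fun x => decide (x ≠ 0)) (v :: (q' ++ [(0:Int)]))).length
              = (v :: (q' ++ [(0:Int)])).length) := by
            intro hcon
            have heq := List.IsPrefix.eq_of_length (List.takeWhile_prefix _) hcon
            have := List.takeWhile_eq_self_iff.mp heq 0 hmem
            simp at this
          have hdw : ¬((List.dropWhile (fun x => decide (x ≠ 0)) (v :: (q' ++ [(0:Int)]))).isEmpty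
              = true) := by
            intro hcon
            have heq : List.dropWhile (fun x => decide (x ≠ 0)) (v :: (q' ++ [(0:Int)])) = [] := by
              simpa [List.isEmpty_iff] using hcon
            have := List.dropWhile_eq_nil_iff.mp heq 0 hmem
            simp at this
          have hd : List.dropWhile (fun x => decide (x ≠ 0)) (v :: (q' ++ [(0:Int)]))
              = List.dropWhile (fun x => decide (x ≠ 0)) (q' ++ [(0:Int)]) := by
            simp [hv]
          have hlen3 : (List.dropWhile (fun x => decide (x ≠ 0)) (v :: (q' ++ [(0:Int)]))).length ≤ n := by
            rw [hd]
            exact le_trans (List.length_dropWhile_le _ _) (by simp at hl ⊢; omega)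
          obtain ⟨qq, hqq⟩ := dropWhile_ends_zero q'
          have hrec := ih (List.dropWhile (fun x => decide (x ≠ 0)) (v :: (q' ++ [(0:Int)]))) rest
            hlen3 (Or.inr ⟨qq, by rw [hd, hqq]⟩)
          simp only [List.cons_append, bRunI, if_neg hv]
          rw [show v :: (q' ++ [(0:Int)] ++ rest) = (v :: (q' ++ [(0:Int)])) ++ rest by simp]
          rw [List.takeWhile_append, if_neg htw, List.dropWhile_append, if_neg hdw]
          rw [hrec, List.append_assoc]

lemma bRunI_append (p rest : List Int) (h : p = [] ∨ ∃ q, p = q ++ [(0:Int)]) :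
    bRunI (p ++ rest) = bRunI p ++ bRunI rest :=
  bRunI_append_aux p.length p rest le_rfl h

lemma bRunI_run_zero (mid : List Int) (h : ∀ x ∈ mid, x ≠ 0) :
    bRunI (mid ++ [0]) = PySem.List.sorted mid (fun x => x) false ++ [0] := by
  cases mid with
  | nil => simp [bRunI]; rfl
  | cons v m' =>
    have hv : v ≠ 0 := h v (by simp)
    have hall : ∀ x ∈ v :: m', (fun x => decide (x ≠ 0)) x = true := by
      intro x hx; simpa using h x hx
    have htw : (List.takeWhile (fun x => decide (x ≠ 0)) (v :: m')).length = (v :: m').length := by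
      rw [List.takeWhile_eq_self_iff.mpr hall]
    have hdw : (List.dropWhile (fun x => decide (x ≠ 0)) (v :: m')).isEmpty = true := by
      rw [List.dropWhile_eq_nil_iff.mpr hall]; rfl
    simp only [List.cons_append, bRunI, if_neg hv]
    rw [show v :: (m' ++ [(0:Int)]) = (v :: m') ++ [(0:Int)] by simp]
    rw [List.takeWhile_append, if_pos htw, List.dropWhile_append, if_pos hdw]
    have h1 : List.takeWhile (fun x => decide (x ≠ 0)) [(0:Int)] = [] := by simp
    have h2 : List.dropWhile (fun x => decide (x ≠ 0)) [(0:Int)] = [(0:Int)] := by simp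
    rw [h1, h2, List.append_nil]
    simp [bRunI]

lemma bRunI_all_nz (run : List Int) (h : ∀ x ∈ run, x ≠ 0) :
    bRunI run = PySem.List.sorted run (fun x => x) false := by
  cases run with
  | nil => simp [bRunI]; rfl
  | cons v r =>
    have hv : v ≠ 0 := h v (by simp)
    have hall : ∀ x ∈ v :: r, (fun x => decide (x ≠ 0)) x = true := by
      intro x hx; simpa using h x hx
    simp only [bRunI, if_neg hv]
    rw [List.takeWhile_eq_self_iff.mpr hall, List.dropWhile_eq_nil_iff.mpr hall]
    simp [bRunI]

lemma take_split (vals : List Int) (start : Nat) (hs : 0 < start) (hlt : start ≤ vals.length)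
    (hz : vals.getD (start - 1) 0 = 0) : ∃ q, vals.take start = q ++ [(0:Int)] := by
  refine ⟨vals.take (start - 1), ?_⟩
  have h1 : start - 1 + 1 = start := by omega
  have hl : start - 1 < vals.length := by omega
  have hv : vals[start - 1] = 0 := by rw [← getD_lt vals _ hl]; exact hz
  rw [← h1, List.take_add_one]
  rw [List.getElem?_eq_getElem hl, hv]
  rfl

lemma mem_take_drop_ne (vals : List Int) (start el : Nat) (_hel : el ≤ vals.length)
    (hpend : ∀ i, start ≤ i → i < el → vals.getD i 0 ≠ 0) :
    ∀ x ∈ (vals.drop start).take (el - start), x ≠ 0 := by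
  intro x hx
  obtain ⟨j, hj, hxe⟩ := List.mem_iff_getElem.mp hx
  have hj1 : j < el - start := lt_of_lt_of_le hj (by rw [List.length_take]; exact min_le_left _ _)
  have hj2 : start + j < vals.length := by
    have h2 : j < vals.length - start :=
      lt_of_lt_of_le hj (by rw [List.length_take, List.length_drop]; exact min_le_right _ _)
    omega
  have hxv : x = vals[start + j] := by
    rw [← hxe]
    have hq : ((vals.drop start).take (el - start))[j]? = vals[start + j]? := by
      rw [List.getElem?_take, if_pos hj1, List.getElem?_drop]
    rw [List.getElem?_eq_getElem hj, List.getElem?_eq_getElem hj2] at hq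
    exact Option.some.inj hq
  rw [hxv, ← getD_lt vals _ hj2]
  exact hpend (start + j) (Nat.le_add_right _ _) (by omega)

lemma mem_drop_ne (vals : List Int) (start : Nat)
    (hpend : ∀ i, start ≤ i → i < vals.length → vals.getD i 0 ≠ 0) :
    ∀ x ∈ vals.drop start, x ≠ 0 := by
  intro x hx
  obtain ⟨j, hj, hxe⟩ := List.mem_iff_getElem.mp hx
  have hj2 : start + j < vals.length := by
    have := hj; rw [List.length_drop] at this; omega
  have hxv : x = vals[start + j] := by
    rw [← hxe]
    have hq : (vals.drop start)[j]? = vals[start + j]? := List.getElem?_drop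
    rw [List.getElem?_eq_getElem hj, List.getElem?_eq_getElem hj2] at hq
    exact Option.some.inj hq
  rw [hxv, ← getD_lt vals _ hj2]
  exact hpend (start + j) (Nat.le_add_right _ _) (by omega)

lemma take_ends (vals : List Int) (start : Nat) (hle : start ≤ vals.length)
    (hstart : start = 0 ∨ vals.getD (start - 1) 0 = 0) :
    vals.take start = [] ∨ ∃ q, vals.take start = q ++ [(0:Int)] := by
  by_cases hs0 : start = 0
  · left; simp [hs0]
  · right
    apply take_split vals start (Nat.pos_of_ne_zero hs0) hle
    rcases hstart with h | h
    · exact absurd h hs0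
    · exact h

lemma flush (vals : List Int) (start el : Nat) (h1 : start ≤ el) (h2 : el < vals.length)
    (hz : vals.getD el 0 = 0)
    (hstart : start = 0 ∨ vals.getD (start - 1) 0 = 0)
    (hpend : ∀ i, start ≤ i → i < el → vals.getD i 0 ≠ 0) :
    bRunI (vals.take (el + 1)) =
      bRunI (vals.take start)
        ++ PySem.List.sorted ((vals.drop start).take (el - start)) (fun x => x) false ++ [0] := by
  have hvel : vals[el] = 0 := by rw [← getD_lt vals el h2]; exact hz
  have hdecomp : vals.take (el + 1)
      = vals.take start ++ ((vals.drop start).take (el - start) ++ [0]) := by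
    have h3 : el + 1 = start + (el + 1 - start) := by omega
    rw [h3, List.take_add]
    congr 1
    have h4 : el + 1 - start = (el - start) + 1 := by omega
    rw [h4, List.take_add_one]
    congr 1
    rw [List.getElem?_drop]
    have h5 : start + (el - start) = el := by omega
    rw [h5, List.getElem?_eq_getElem h2, hvel]
    rfl
  rw [hdecomp, bRunI_append _ _ (take_ends vals start (by omega) hstart),
    bRunI_run_zero _ (mem_take_drop_ne vals start el (by omega) hpend), List.append_assoc]

lemma flushLast (vals : List Int) (start : Nat) (h1 : start < vals.length)
    (hstart : start = 0 ∨ vals.getD (start - 1) 0 = 0)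
    (hpend : ∀ i, start ≤ i → i < vals.length → vals.getD i 0 ≠ 0) :
    bRunI vals = bRunI (vals.take start) ++ PySem.List.sorted (vals.drop start) (fun x => x) false := by
  conv_lhs => rw [← List.take_append_drop start vals]
  rw [bRunI_append _ _ (take_ends vals start (le_of_lt h1) hstart),
    bRunI_all_nz _ (mem_drop_ne vals start hpend)]

lemma stepZero (width : Nat) (row : List String) (vals : List Int)
    (start el : Nat) (part : List Int)
    (hlen : vals.length = width) (hel : el < width) (h1 : start ≤ el)
    (hz : vals.getD el 0 = 0)
    (hpart : part = bRunI (vals.take start))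
    (hstart : start = 0 ∨ vals.getD (start - 1) 0 = 0)
    (hpend : ∀ i, start ≤ i → i < el → vals.getD i 0 ≠ 0) :
    pvAStep width row vals (start, el, part) el = (el + 1, el + 1, bRunI (vals.take (el + 1))) := by
  have hflush := flush vals start el h1 (hlen ▸ hel) hz hstart hpend
  simp only [pvAStep]
  rw [if_neg (fun hc => hc.2 hz)]
  by_cases hb : pvAPrevNZ width row vals el = true
  · rw [if_pos ⟨hz, hb⟩]
    have hval : part
        ++ PySem.List.sorted (PySem.List.slice vals (some (start : Int)) (some (el : Int))) (fun x => x) false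
        ++ [vals.getD el 0] = bRunI (vals.take (el + 1)) := by
      rw [hpart, hz, PySem.List.slice_natCast, hflush]
    rw [hval]
  · have hb' : pvAPrevNZ width row vals el = false := by
      cases h : pvAPrevNZ width row vals el
      · rfl
      · exact absurd h hb
    rw [if_neg (fun hc => hb hc.2), if_pos ⟨hz, hb'⟩]
    have hse : start = el := by
      rcases lt_or_eq_of_le h1 with hlt | he
      · exfalso
        have hne : el ≠ 0 := by omega
        have hnz := hpend (el - 1) (by omega) (by omega)
        unfold pvAPrevNZ at hb'
        rw [if_neg hne] at hb'
        simp at hb'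
        exact hnz hb'
      · exact he
    subst hse
    simp only [Nat.sub_self, List.take_zero] at hflush
    rw [show PySem.List.sorted ([] : List Int) (fun x => x) false = [] from rfl,
      List.append_nil] at hflush
    have hval : part ++ [vals.getD start 0] = bRunI (vals.take (start + 1)) := by
      rw [hpart, hz, hflush]
    rw [hval]

lemma loopA (row : List String) (width : Nat) (vals : List Int) (hlen : vals.length = width) :
    ∀ (n : Nat), 1 ≤ n → ∀ (el start : Nat) (part : List Int),
      el + n = width → start ≤ el →
      part = bRunI (vals.take start) →
      (start = 0 ∨ vals.getD (start - 1) 0 = 0) →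
      (∀ i, start ≤ i → i < el → vals.getD i 0 ≠ 0) →
      ((List.range' el n).foldl (pvAStep width row vals) (start, el, part)).2.2 = bRunI vals := by
  intro n
  induction n with
  | zero => intro h; omega
  | succ n ih =>
    intro _ el start part hw h1 hpart hstart hpend
    rw [List.range'_succ, List.foldl_cons]
    by_cases hz : vals.getD el 0 = 0
    · rw [stepZero width row vals start el part hlen (by omega) h1 hz hpart hstart hpend]
      by_cases hn : n = 0
      · subst hn
        have ht : vals.take (el + 1) = vals := by
          have h5 : el + 1 = vals.length := by omega
          rw [h5, List.take_length]
        exact congrArg bRunI ht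
      · exact ih (by omega) (el + 1) (el + 1) _ (by omega) le_rfl rfl
          (Or.inr (by simpa using hz)) (by intro i hi1 hi2; omega)
    · by_cases hn : n = 0
      · subst hn
        have hstep : pvAStep width row vals (start, el, part) el
            = (start, el + 1, part ++ PySem.List.sorted (PySem.List.sorted
                (PySem.List.slice vals (some (start : Int)) (some ((el + 1 : Nat) : Int)))
                (fun x => x) false) (fun x => x) false) := by
          simp only [pvAStep]
          rw [if_neg (fun hc => hc.1 (by omega))]
          rw [if_neg (fun hc => hz hc.1), if_neg (fun hc => hz hc.1)]
          rw [if_pos ⟨by omega, hz⟩]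
        rw [hstep]
        have hsl : PySem.List.slice vals (some (start : Int)) (some ((el + 1 : Nat) : Int))
            = ((vals.drop start).take (el + 1 - start)) := PySem.List.slice_natCast vals start (el + 1)
        have hfull : (vals.drop start).take (el + 1 - start) = vals.drop start := by
          apply List.take_of_length_le
          rw [List.length_drop]
          omega
        have hpend' : ∀ i, start ≤ i → i < vals.length → vals.getD i 0 ≠ 0 := by
          intro i hi1 hi2
          have hilt : i < el + 1 := by omega
          rcases Nat.lt_succ_iff_lt_or_eq.mp hilt with h | h
          · exact hpend i hi1 h
          · rw [h]; exact hz
        have hval : part ++ PySem.List.sorted (PySem.List.sorted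
              (PySem.List.slice vals (some (start : Int)) (some ((el + 1 : Nat) : Int)))
              (fun x => x) false) (fun x => x) false = bRunI vals := by
          rw [hsl, hfull, PySem.List.sorted_sorted, hpart]
          exact (flushLast vals start (by omega) hstart hpend').symm
        exact hval
      · have hstep : pvAStep width row vals (start, el, part) el = (start, el + 1, part) := by
          simp only [pvAStep]
          rw [if_pos ⟨by omega, hz⟩]
        rw [hstep]
        exact ih (by omega) (el + 1) start part (by omega) (by omega) hpart hstart
          (by intro i hi1 hi2
              rcases Nat.lt_succ_iff_lt_or_eq.mp hi2 with h | h
              · exact hpend i hi1 h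
              · rw [h]; exact hz)

lemma pvARow_eq (row : List String) (width : Nat)
    (hlen : (pvAConv width row).length = width) :
    pvARow width row = bRunI (pvAConv width row) := by
  by_cases hw : width = 0
  · subst hw
    have hconv : pvAConv 0 row = [] := by simp [pvAConv]
    simp [pvARow, hconv, bRunI]
  · simp only [pvARow]
    rw [List.range_eq_range']
    exact loopA row width (pvAConv width row) hlen width (by omega) 0 0 [] (by omega) le_rfl
      (by simp [bRunI]) (Or.inl rfl) (by intro i hi1 hi2; omega)

-- ---------- B-side: the keyed list in closed form ----------

-- closed form of the pair-building loop from counter c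
def keyedC : List Int → Int → List (Int × Int)
  | [], _ => []
  | v :: t, c => if v = 0 then keyedC t (c + 1) else (c, v) :: keyedC t c

lemma keyed_fold : ∀ (vals : List Int) (c : Int) (acc : List (Int × Int)),
    (vals.foldl pvKeyedStep (c, acc)).2 = acc ++ keyedC vals c := by
  intro vals
  induction vals with
  | nil => intro c acc; simp [keyedC]
  | cons v t ih =>
    intro c acc
    by_cases hv : v = 0
    · subst hv
      simp [List.foldl_cons, pvKeyedStep, keyedC, ih]
    · simp only [List.foldl_cons, pvKeyedStep, if_neg hv, keyedC, ih, List.append_assoc,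
        List.singleton_append]

lemma pvKeyed_eq (vals : List Int) : pvKeyed vals = keyedC vals 0 := by
  simpa using keyed_fold vals 0 []

def pvShift (p : Int × Int) : Int × Int := (p.1 + 1, p.2)

lemma keyedC_shift : ∀ (t : List Int) (c : Int), keyedC t (c + 1) = (keyedC t c).map pvShift := by
  intro t
  induction t with
  | nil => intro c; simp [keyedC]
  | cons v r ih =>
    intro c
    by_cases hv : v = 0
    · subst hv; simp [keyedC, ih]
    · simp [keyedC, if_neg hv, ih, pvShift]

lemma keyedC_nz_prefix : ∀ (r : List Int), (∀ v ∈ r, v ≠ 0) → ∀ (w : List Int) (c : Int),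
    keyedC (r ++ w) c = r.map (fun v => (c, v)) ++ keyedC w c := by
  intro r
  induction r with
  | nil => intro _ w c; simp
  | cons v t ih =>
    intro h w c
    have hv : v ≠ 0 := h v (by simp)
    simp only [List.cons_append, keyedC, if_neg hv, List.map_cons, List.cons_append]
    rw [ih (fun x hx => h x (by simp [hx])) w c]

lemma keyedC_fst_ge : ∀ (t : List Int) (c : Int), ∀ p ∈ keyedC t c, c ≤ p.1 := by
  intro t
  induction t with
  | nil => intro c p hp; simp [keyedC] at hp
  | cons v r ih =>
    intro c p hp
    by_cases hv : v = 0
    · subst hv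
      simp only [keyedC] at hp
      have := ih (c + 1) p hp
      omega
    · simp only [keyedC, if_neg hv, List.mem_cons] at hp
      rcases hp with rfl | hp
      · exact le_refl _
      · exact ih c p hp

-- ---------- B-side: facts about the lexicographic sort ----------

lemma sorted_map_const (r : List Int) :
    PySem.List.sorted (r.map (fun v => ((0:Int), v))) (fun p => toLex p) false
      = (PySem.List.sorted r (fun x => x) false).map (fun v => ((0:Int), v)) := by
  apply PySem.List.eq_of_perm_of_pairwise_le_of_injective (fun p => toLex p) toLex.injective
  · exact (PySem.List.sorted_perm _ _ _).trans
      ((PySem.List.sorted_perm r (fun x => x) false).map _).symm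
  · exact PySem.List.sorted_pairwise _ _
  · refine List.Pairwise.map _ ?_ (PySem.List.sorted_pairwise r (fun x => x))
    intro a b hab
    exact Prod.Lex.toLex_le_toLex.mpr (Or.inr ⟨rfl, hab⟩)

lemma sorted_split (l1 l2 : List (Int × Int)) (h1 : ∀ p ∈ l1, p.1 = 0) (h2 : ∀ p ∈ l2, 1 ≤ p.1) :
    PySem.List.sorted (l1 ++ l2) (fun p => toLex p) false
      = PySem.List.sorted l1 (fun p => toLex p) false
        ++ PySem.List.sorted l2 (fun p => toLex p) false := by
  apply PySem.List.eq_of_perm_of_pairwise_le_of_injective (fun p => toLex p) toLex.injective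
  · exact (PySem.List.sorted_perm _ _ _).trans
      (((PySem.List.sorted_perm l1 _ false).append (PySem.List.sorted_perm l2 _ false)).symm)
  · exact PySem.List.sorted_pairwise _ _
  · rw [List.pairwise_append]
    refine ⟨PySem.List.sorted_pairwise _ _, PySem.List.sorted_pairwise _ _, ?_⟩
    intro a ha b hb
    have ha0 : a.1 = 0 := h1 a ((PySem.List.mem_sorted _ _ _ _).mp ha)
    have hb1 : 1 ≤ b.1 := h2 b ((PySem.List.mem_sorted _ _ _ _).mp hb)
    exact Prod.Lex.toLex_le_toLex.mpr (Or.inl (by omega))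

lemma sorted_map_shift (K : List (Int × Int)) :
    PySem.List.sorted (K.map pvShift) (fun p => toLex p) false
      = (PySem.List.sorted K (fun p => toLex p) false).map pvShift := by
  apply PySem.List.eq_of_perm_of_pairwise_le_of_injective (fun p => toLex p) toLex.injective
  · exact (PySem.List.sorted_perm _ _ _).trans
      ((PySem.List.sorted_perm K _ false).map _).symm
  · exact PySem.List.sorted_pairwise _ _
  · refine List.Pairwise.map _ ?_ (PySem.List.sorted_pairwise K (fun p => toLex p))
    intro a b hab
    rcases Prod.Lex.toLex_le_toLex.mp hab with h | ⟨h, h2⟩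
    · exact Prod.Lex.toLex_le_toLex.mpr (Or.inl (by simp [pvShift]; omega))
    · exact Prod.Lex.toLex_le_toLex.mpr (Or.inr ⟨by simp [pvShift, h], h2⟩)

-- ---------- B-side: facts about the refill pass ----------

lemma refill_map_shift : ∀ (vals : List Int) (Q : List (Int × Int)),
    pvRefill vals (Q.map pvShift) = pvRefill vals Q := by
  intro vals
  induction vals with
  | nil => intro Q; rfl
  | cons v rest ih =>
    intro Q
    by_cases hv : v = 0
    · subst hv; simp [pvRefill, ih]
    · cases Q with
      | nil => simp only [List.map_nil, pvRefill, if_neg hv, List.tail_nil]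
      | cons q qt =>
        simp only [List.map_cons, pvRefill, if_neg hv, List.headD_cons, List.tail_cons, ih, pvShift]

lemma refill_nz_prefix : ∀ (r : List Int), (∀ v ∈ r, v ≠ 0) →
    ∀ (w : List Int) (q q' : List (Int × Int)), q.length = r.length →
    pvRefill (r ++ w) (q ++ q')
      = q.map (fun p => PySem.Int.toStr p.2) ++ pvRefill w q' := by
  intro r
  induction r with
  | nil =>
    intro _ w q q' hq
    have hq0 : q = [] := List.length_eq_zero_iff.mp (by simpa using hq)
    subst hq0
    simp
  | cons v t ih =>
    intro h w q q' hq
    have hv : v ≠ 0 := h v (by simp)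
    cases q with
    | nil => simp at hq
    | cons p pt =>
      simp only [List.cons_append, pvRefill, if_neg hv, List.headD_cons, List.tail_cons,
        List.map_cons, List.cons_append]
      rw [ih (fun x hx => h x (by simp [hx])) w pt q' (by simpa using hq)]

-- ---------- B-side: the main row lemma ----------

lemma pvBRow_eq_aux : ∀ (n : Nat) (vals : List Int), vals.length ≤ n →
    pvRefill vals (PySem.List.sorted (keyedC vals 0) (fun p => toLex p) false)
      = (bRunI vals).map PySem.Int.toStr := by
  intro n
  induction n with
  | zero =>
    intro vals h
    rw [List.length_eq_zero_iff.mp (Nat.le_zero.mp h)]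
    simp [pvRefill, bRunI]
  | succ n ih =>
    intro vals hlen
    by_cases hz : (0:Int) ∈ vals
    · -- vals = r ++ 0 :: rest with r the (all non-zero) takeWhile prefix
      set P : Int → Bool := fun x => decide (x ≠ 0) with hP
      have hdne : vals.dropWhile P ≠ [] := by
        intro hcon
        have := List.dropWhile_eq_nil_iff.mp hcon 0 hz
        simp [hP] at this
      obtain ⟨d, rest, hd⟩ := List.exists_cons_of_ne_nil hdne
      have hd0 : d = 0 := by
        have h1 := List.head_dropWhile_not P (l := vals) hdne
        have h2 : (List.dropWhile P vals).head hdne = d := by simp [hd]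
        rw [h2] at h1
        simpa [hP] using h1
      subst hd0
      have hsplit : vals = vals.takeWhile P ++ (0 :: rest) := by
        rw [← hd, List.takeWhile_append_dropWhile]
      set r := vals.takeWhile P with hr
      have hrnz : ∀ v ∈ r, v ≠ 0 := by
        intro v hv
        have := List.mem_takeWhile_imp hv
        simpa [hP] using this
      have hrest_len : rest.length ≤ n := by
        have : vals.length = r.length + 1 + rest.length := by
          rw [hsplit]; simp; omega
        omega
      -- keyed pairs in closed form
      have hkey : keyedC vals 0
          = r.map (fun v => ((0:Int), v)) ++ (keyedC rest 0).map pvShift := by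
        rw [hsplit, keyedC_nz_prefix r hrnz]
        have : keyedC (0 :: rest) 0 = keyedC rest 1 := by simp [keyedC]
        rw [this, show (1:Int) = 0 + 1 by ring, keyedC_shift]
      -- the single sort splits at the group boundary
      have hsort : PySem.List.sorted (keyedC vals 0) (fun p => toLex p) false
          = (PySem.List.sorted r (fun x => x) false).map (fun v => ((0:Int), v))
            ++ (PySem.List.sorted (keyedC rest 0) (fun p => toLex p) false).map pvShift := by
        rw [hkey, sorted_split _ _ (by intro p hp; simp at hp; obtain ⟨v, _, hpv⟩ := hp; simp [← hpv])
          (by intro p hp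
              simp only [List.mem_map] at hp
              obtain ⟨q, hq, hpq⟩ := hp
              have := keyedC_fst_ge rest 0 q hq
              simp [← hpq, pvShift]; omega),
          sorted_map_const, sorted_map_shift]
      rw [hsort]
      conv_lhs => rw [hsplit]
      rw [refill_nz_prefix r hrnz _ _ _ (by simp [PySem.List.length_sorted])]
      simp only [pvRefill]
      rw [refill_map_shift, ih rest hrest_len]
      -- right-hand side
      have hrhs : bRunI vals = PySem.List.sorted r (fun x => x) false ++ 0 :: bRunI rest := by
        rw [hsplit, show r ++ (0 :: rest) = (r ++ [0]) ++ rest by simp,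
          bRunI_append _ _ (Or.inr ⟨r, rfl⟩), bRunI_run_zero r hrnz]
        simp
      rw [hrhs]
      simp [toStr_zero, Function.comp]
    · -- no zero: one group, the sort is sorted(vals) itself
      have hnz : ∀ v ∈ vals, v ≠ 0 := fun v hv hc => hz (hc ▸ hv)
      have hkey : keyedC vals 0 = vals.map (fun v => ((0:Int), v)) := by
        have := keyedC_nz_prefix vals hnz [] 0
        simpa [keyedC] using this
      rw [hkey, sorted_map_const]
      have := refill_nz_prefix vals hnz []
        ((PySem.List.sorted vals (fun x => x) false).map (fun v => ((0:Int), v))) []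
        (by simp [PySem.List.length_sorted])
      simp only [List.append_nil] at this
      rw [this, bRunI_all_nz vals hnz]
      simp [pvRefill]

-- ===== VERDICT (by name: the statement is the Claim_ definition above) =====
theorem sort_rows_border_spec : Claim_equal_sort_rows_border := by
  unfold Claim_equal_sort_rows_border
  intro img _ hpre
  unfold Spec_sort_rows_border
  obtain ⟨hne, hrows⟩ := hpre
  simp only [sort_rows_border, sort_rows_border_alt]
  refine List.map_congr_left ?_
  intro row hrow
  obtain ⟨hwle, -⟩ := hrows row hrow
  have hlen : ((row.take (img.headD []).length).map
      (fun s => (PySem.Int.ofStr? s).getD 0)).length = (img.headD []).length := by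
    simp only [List.length_map, List.length_take]
    omega
  rw [pvARow_eq row _ hlen, pvKeyed_eq]
  exact (pvBRow_eq_aux
    ((row.take (img.headD []).length).map (fun s => (PySem.Int.ofStr? s).getD 0)).length _
    le_rfl).symm
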